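-- pv_equiv track=rewrite | github.com/sonny0430/Coding_Python | 프로그래머스/0/120843. 공 던지기/공 던지기.py | solution
-- ===== SOURCE A (Python) =====
-- def solution(numbers, k):
--     result = 0
--     for i in range(1, k):
--         result += 2
--
--         if result == len(numbers):
--             result = 0
--         elif result == (len(numbers) + 1):
--             result = 1
--         else:
--             pass
--
--     return numbers[result]
-- ===== SOURCE B (Python) =====
-- def solution(numbers, k):
--     return numbers[2 * max(k - 1, 0) % len(numbers)]
-- ===== Notes on version B (the rewrite author's own statement) =====
-- stated objective: faster
-- what changed: Replaced the O(k) step-by-step simulation loop with the closed-form index 2*max(k-1,0) % len(numbers).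
import Mathlib
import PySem

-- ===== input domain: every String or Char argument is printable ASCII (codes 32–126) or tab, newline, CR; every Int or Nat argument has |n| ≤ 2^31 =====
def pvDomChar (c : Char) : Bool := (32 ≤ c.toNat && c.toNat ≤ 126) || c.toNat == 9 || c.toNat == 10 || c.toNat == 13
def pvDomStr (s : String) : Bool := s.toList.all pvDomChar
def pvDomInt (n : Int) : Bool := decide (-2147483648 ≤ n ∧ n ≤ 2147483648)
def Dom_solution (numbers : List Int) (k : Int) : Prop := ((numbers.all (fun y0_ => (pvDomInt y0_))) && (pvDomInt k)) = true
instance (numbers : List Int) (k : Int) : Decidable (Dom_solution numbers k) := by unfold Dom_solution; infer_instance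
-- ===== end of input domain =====

-- B replaces A's O(k) pass-simulation loop with the closed-form index 2*max(k-1,0) % len.

-- ===== PORT A =====
def solution (numbers : List Int) (k : Int) : Int :=
  let result := (PySem.List.pyRange 1 k 1).foldl
    (fun result _ =>
      let result := result + 2
      if result = (numbers.length : Int) then 0
      else if result = (numbers.length : Int) + 1 then 1
      else result) 0
  -- numbers[result]; Pre_ excludes the IndexError case, so getD 0 is never taken
  (PySem.List.pyGet? numbers result).getD 0

-- ===== PORT B =====
def solution_alt (numbers : List Int) (k : Int) : Int :=
  (PySem.List.pyGet? numbers (PySem.Int.mod (2 * max (k - 1) 0) (numbers.length : Int))).getD 0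

-- ===== PRECONDITION & SPEC =====
-- Pre_ excludes exactly the inputs where A raises: an empty list (IndexError, and
-- B's % len is a ZeroDivisionError), and a singleton list with k ≥ 2 (A's wrap
-- logic assumes len ≥ 2 and walks off the end: IndexError).
def Pre_solution (numbers : List Int) (k : Int) : Prop :=
  numbers ≠ [] ∧ (2 ≤ numbers.length ∨ k ≤ 1)
instance (numbers : List Int) (k : Int) : Decidable (Pre_solution numbers k) := by
  unfold Pre_solution; infer_instance
def pvWitness_solution : List Int × Int := ([1, 2, 3, 4], 5)

def Spec_solution (numbers : List Int) (k : Int) (out : Int) : Prop := out = solution_alt numbers k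
instance (numbers : List Int) (k : Int) (out : Int) : Decidable (Spec_solution numbers k out) := by unfold Spec_solution; infer_instance

-- ===== CLAIM (what is proved, stated in full; the proofs are below) =====
def Claim_equal_solution : Prop := ∀ (numbers : List Int) (k : Int), Dom_solution numbers k → Pre_solution numbers k → Spec_solution numbers k (solution numbers k)

-- ===== LEMMAS AND PROOFS =====

-- A's loop body, abstracted over the list length L.
def pvStep (L r : Int) : Int :=
  if r + 2 = L then 0 else if r + 2 = L + 1 then 1 else r + 2

-- Invariant: with L ≥ 2 and 0 ≤ r < L, folding A's step over any list of length n
-- adds 2·n modulo L (the loop body ignores the loop variable).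
theorem pvFold_inv {α : Type} (L : Int) (hL : 2 ≤ L) (l : List α) :
    ∀ r : Int, 0 ≤ r → r < L →
      l.foldl (fun r _ => pvStep L r) r = (r + 2 * l.length) % L := by
  induction l with
  | nil =>
    intro r h0 hl
    simp [Int.emod_eq_of_lt h0 hl]
  | cons x xs ih =>
    intro r h0 hl
    have hstep : pvStep L r = (r + 2) % L ∧ 0 ≤ pvStep L r ∧ pvStep L r < L := by
      unfold pvStep
      split_ifs with h1 h2
      · refine ⟨?_, by omega, by omega⟩
        rw [h1]; simp
      · refine ⟨?_, by omega, by omega⟩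
        rw [h2, show L + 1 = 1 + L * 1 by ring, Int.add_mul_emod_self_left]
        exact (Int.emod_eq_of_lt (by omega) (by omega)).symm
      · exact ⟨(Int.emod_eq_of_lt (by omega) (by omega)).symm, by omega, by omega⟩
    rw [List.foldl_cons, ih (pvStep L r) hstep.2.1 hstep.2.2, hstep.1,
      Int.emod_add_emod]
    congr 1
    simp only [List.length_cons]
    push_cast
    ring

theorem pv_mod_pos (L : Int) (hL : 0 < L) (a : Int) : PySem.Int.mod a L = a % L :=
  PySem.Int.mod_eq_emod_of_pos hL

theorem solution_eq_alt (numbers : List Int) (k : Int)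
    (h : Pre_solution numbers k) : solution numbers k = solution_alt numbers k := by
  obtain ⟨hne, hcase⟩ := h
  have hlen : 1 ≤ numbers.length := List.length_pos_of_ne_nil hne
  unfold solution solution_alt
  -- A's loop body is definitionally pvStep applied to the list length
  show (PySem.List.pyGet? numbers
      ((PySem.List.pyRange 1 k 1).foldl
        (fun r (_ : Int) => pvStep (numbers.length : Int) r) 0)).getD 0 = _
  by_cases hk : k ≤ 1
  · -- empty loop: result = 0; B's index is 2*0 % L = 0
    rw [PySem.List.pyRange_one_eq_nil hk]
    have hmax : max (k - 1) 0 = 0 := by omega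
    rw [hmax, pv_mod_pos _ (by exact_mod_cast hlen)]
    norm_num
  · -- k ≥ 2, hence L ≥ 2 by Pre_; apply the loop invariant
    have hL2 : (2 : Int) ≤ (numbers.length : Int) := by
      have : 2 ≤ numbers.length := by omega
      exact_mod_cast this
    rw [pvFold_inv (numbers.length : Int) hL2 (PySem.List.pyRange 1 k 1) 0
        le_rfl (by omega),
      PySem.List.length_pyRange_one, pv_mod_pos _ (by omega)]
    have hmax : max (k - 1) 0 = k - 1 := by omega
    have hcast : ((k - 1).toNat : Int) = k - 1 := by omega
    rw [hmax, hcast]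
    norm_num

-- ===== VERDICT (by name: the statement is the Claim_ definition above) =====
theorem solution_spec : Claim_equal_solution := by
  intro numbers k _ hpre
  unfold Spec_solution
  exact solution_eq_alt numbers k hpre
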